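-- pv_equiv track=rewrite | github.com/moo-on/Algorithm | problem_strategy/구현/구현_문자열처리2.py | solution
-- ===== SOURCE A (Python) =====
-- def solution(a):
--     answer = []
--     for s in a:
--         while len(s)>=2:
--             if s[0] == 'a' or s[-1] == 'a':
--                 s = s.strip("a")
--             elif s[0] == 'b' and s[-1] == 'b':
--                 s = ''.join([s[1:-1]])
--         if s =='a':
--             answer.append(True)
--         else :
--             answer.append(False)
--     return answer
-- ===== SOURCE B (Python) =====
-- def solution(a):
--     answer = []
--     for s in a:
--         lo, hi = 0, len(s) - 1
--         ok = None
--         while hi - lo >= 1: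
--             if s[lo] == 'a' or s[hi] == 'a':
--                 while lo <= hi and s[lo] == 'a':
--                     lo += 1
--                 while hi >= lo and s[hi] == 'a':
--                     hi -= 1
--             elif s[lo] == 'b' and s[hi] == 'b':
--                 lo += 1
--                 hi -= 1
--             else:
--                 ok = False
--                 break
--         if ok is None:
--             ok = lo == hi and s[lo] == 'a'
--         answer.append(ok)
--     return answer
-- ===== Notes on version B (the rewrite author's own statement) =====
-- stated objective: alternative
-- what changed: Replaces A's repeated string rebuilding (strip/slice creating a new string per step) with a single two-pointer inward scan over the original string; on stuck ends (where A loops forever) B returns False.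
import Mathlib
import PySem

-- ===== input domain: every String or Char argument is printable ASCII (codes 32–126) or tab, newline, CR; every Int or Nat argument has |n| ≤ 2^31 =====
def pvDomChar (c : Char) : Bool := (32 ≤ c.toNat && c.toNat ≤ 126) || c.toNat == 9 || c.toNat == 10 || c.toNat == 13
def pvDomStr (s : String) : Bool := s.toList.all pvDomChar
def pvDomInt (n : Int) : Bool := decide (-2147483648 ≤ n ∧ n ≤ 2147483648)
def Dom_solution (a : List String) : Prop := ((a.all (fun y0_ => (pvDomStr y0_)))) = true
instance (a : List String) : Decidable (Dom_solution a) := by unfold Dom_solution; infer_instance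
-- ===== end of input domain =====

-- B replaces A's repeated string rebuilding (strip / slice each step) with a single
-- two-pointer inward scan over the unchanged string (objective: alternative).

-- ===== PORT A =====

theorem beq_a_eq : (fun c : Char => decide (c = 'a')) = (fun c : Char => c == 'a') := by
  funext c
  exact (beq_eq_decide c 'a').symm

-- s.strip("a") in terms of dropWhile (used by the port's termination proof and below)
theorem stripChars_a (s : List Char) : PySem.Chars.stripChars s ['a'] =
    (List.dropWhile (· == 'a') (List.dropWhile (· == 'a') s).reverse).reverse := by
  simp [PySem.Chars.stripChars, beq_a_eq]

-- termination helper for the strip branch: stripping an 'a' end shortens the string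
theorem pvStripLt (m : List Char) (h2 : 2 ≤ m.length)
    (ha : PySem.List.pyGet? m 0 = some 'a' ∨ PySem.List.pyGet? m (-1) = some 'a') :
    (PySem.Chars.stripChars m ['a']).length < m.length := by
  rw [stripChars_a]
  have hle : ∀ s : List Char, (List.dropWhile (· == 'a') s).length ≤ s.length :=
    fun s => List.length_dropWhile_le _ s
  rcases ha with h0 | h0
  · -- head is 'a'
    rw [PySem.List.pyGet?_zero] at h0
    rcases m with _ | ⟨c, t⟩
    · simp at h0
    · simp at h0
      subst h0
      have h1 : List.dropWhile (· == 'a') ('a' :: t) = List.dropWhile (· == 'a') t :=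
        List.dropWhile_cons_of_pos (by simp)
      calc (List.dropWhile (· == 'a') (List.dropWhile (· == 'a') ('a' :: t)).reverse).reverse.length
          ≤ (List.dropWhile (· == 'a') ('a' :: t)).reverse.length := by
            simpa using hle (List.dropWhile (· == 'a') ('a' :: t)).reverse
        _ = (List.dropWhile (· == 'a') t).length := by rw [h1, List.length_reverse]
        _ ≤ t.length := hle t
        _ < ('a' :: t).length := by simp
  · -- last is 'a'
    rw [PySem.List.pyGet?_neg_one] at h0
    by_cases hd : List.dropWhile (· == 'a') m = []
    · rw [hd]
      simp
      omega
    · obtain ⟨pre, hpre⟩ := List.dropWhile_suffix (l := m) (· == 'a')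
      have hlast : (List.dropWhile (· == 'a') m).getLast? = some 'a' := by
        rw [← List.getLast?_append_of_ne_nil pre hd, hpre]
        exact h0
      have hrev : (List.dropWhile (· == 'a') m).reverse.head? = some 'a' := by
        rw [List.head?_reverse]; exact hlast
      rcases hre : (List.dropWhile (· == 'a') m).reverse with _ | ⟨c, r⟩
      · simp [hre] at hrev
      · rw [hre] at hrev
        simp at hrev
        subst hrev
        have hlen1 : (List.dropWhile (· == 'a') m).length = r.length + 1 := by
          have h := congrArg List.length hre
          simp at h
          omega
        have hlen2 : (List.dropWhile (· == 'a') m).length ≤ m.length := hle m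
        calc (List.dropWhile (· == 'a') ('a' :: r)).reverse.length
            = (List.dropWhile (· == 'a') r).length := by
              rw [List.dropWhile_cons_of_pos (by simp), List.length_reverse]
          _ ≤ r.length := hle r
          _ < m.length := by omega

-- termination helper for the peel branch: s[1:-1] shortens the string
theorem pvSliceLt (m : List Char) (h2 : 2 ≤ m.length) :
    (PySem.List.slice m (some 1) (some (-1))).length < m.length := by
  simp [PySem.List.slice, PySem.List.clampIdx, List.length_take, List.length_drop]
  omega

-- the while loop of A: returns the final value of s (on stuck length-≥-2 strings,
-- where the Python loops forever, it returns the current s; B's port returns False there)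
def loopA (m : List Char) : List Char :=
  if h2 : 2 ≤ m.length then
    if ha : PySem.List.pyGet? m 0 = some 'a' ∨ PySem.List.pyGet? m (-1) = some 'a' then
      loopA (PySem.Chars.stripChars m ['a'])              -- s = s.strip("a")
    else if PySem.List.pyGet? m 0 = some 'b' ∧ PySem.List.pyGet? m (-1) = some 'b' then
      loopA (PySem.List.slice m (some 1) (some (-1)))     -- s = ''.join([s[1:-1]]) = s[1:-1]
    else m
  else m
termination_by m.length
decreasing_by
  · exact pvStripLt m h2 ha
  · exact pvSliceLt m h2

def solution (a : List String) : List Bool :=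
  a.map (fun s => loopA s.toList == ['a'])

-- ===== PORT B =====
-- The loops are ported with an explicit fuel parameter (structural recursion); the
-- callers pass enough fuel, so the fuel-0 fallback is never reached on any input.

-- inner while: advance lo past 'a's
def skipLoF : Nat → List Char → Int → Int → Int
  | 0, _, lo, _ => lo
  | fuel + 1, l, lo, hi =>
    if lo ≤ hi ∧ PySem.List.pyGet? l lo = some 'a' then skipLoF fuel l (lo + 1) hi else lo

-- inner while: retreat hi past 'a's
def skipHiF : Nat → List Char → Int → Int → Int
  | 0, _, _, hi => hi
  | fuel + 1, l, lo, hi =>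
    if lo ≤ hi ∧ PySem.List.pyGet? l hi = some 'a' then skipHiF fuel l lo (hi - 1) else hi

-- the while loop of B over indices lo..hi into the fixed string l
def loopBF : Nat → List Char → Int → Int → Bool
  | 0, l, lo, hi => lo == hi && PySem.List.pyGet? l lo == some 'a'
  | fuel + 1, l, lo, hi =>
    if 1 ≤ hi - lo then
      if PySem.List.pyGet? l lo = some 'a' ∨ PySem.List.pyGet? l hi = some 'a' then
        loopBF fuel l (skipLoF (fuel + 1) l lo hi)
          (skipHiF (fuel + 1) l (skipLoF (fuel + 1) l lo hi) hi)
      else if PySem.List.pyGet? l lo = some 'b' ∧ PySem.List.pyGet? l hi = some 'b' then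
        loopBF fuel l (lo + 1) (hi - 1)
      else false
    else lo == hi && PySem.List.pyGet? l lo == some 'a'

def solution_alt (a : List String) : List Bool :=
  a.map (fun s => loopBF (s.toList.length + 1) s.toList 0 ((s.toList.length : Int) - 1))

-- ===== PRECONDITION & SPEC =====
-- (no Pre_: both ports are total and agree on every input; on strings whose reduction
-- gets stuck, where the Python A loops forever and returns nothing, both ports return False)
def Spec_solution (a : List String) (out : List Bool) : Prop := out = solution_alt a
instance (a : List String) (out : List Bool) : Decidable (Spec_solution a out) := by unfold Spec_solution; infer_instance

-- ===== CLAIM (what is proved, stated in full; the proofs are below) =====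
def Claim_equal_solution : Prop := ∀ (a : List String), Dom_solution a → Spec_solution a (solution a)

-- ===== LEMMAS AND PROOFS =====

-- the sublist l[lo..hi] that B's index pair (lo, hi) denotes
def seg (l : List Char) (lo hi : Int) : List Char :=
  (l.drop lo.toNat).take ((hi + 1).toNat - lo.toNat)

theorem seg_length (l : List Char) (lo hi : Int) (hlen : hi < l.length) :
    (seg l lo hi).length = (hi + 1).toNat - lo.toNat := by
  simp [seg, List.length_take, List.length_drop]
  omega

theorem seg_nil (l : List Char) (lo hi : Int) (h : hi < lo) : seg l lo hi = [] := by
  have : (hi + 1).toNat - lo.toNat = 0 := by omega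
  simp [seg, this]

theorem seg_cons (l : List Char) (lo hi : Int) (c : Char)
    (h0 : 0 ≤ lo) (hhi : lo ≤ hi) (hlen : hi < l.length)
    (hc : PySem.List.pyGet? l lo = some c) :
    seg l lo hi = c :: seg l (lo + 1) hi := by
  have hlt : lo.toNat < l.length := by omega
  rw [PySem.List.pyGet?_eq_some_getElem l h0 (by omega)] at hc
  have hcv : l[lo.toNat] = c := Option.some.inj hc
  have hdrop : l.drop lo.toNat = l[lo.toNat] :: l.drop (lo.toNat + 1) :=
    List.drop_eq_getElem_cons hlt
  have hn : (hi + 1).toNat - lo.toNat = ((hi + 1).toNat - (lo + 1).toNat) + 1 := by omega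
  have hl1 : (lo + 1).toNat = lo.toNat + 1 := by omega
  rw [seg, hdrop, hn, List.take_succ_cons, hcv, seg, hl1]

theorem seg_snoc (l : List Char) (lo hi : Int) (c : Char)
    (h0 : 0 ≤ lo) (hhi : lo ≤ hi) (hlen : hi < l.length)
    (hc : PySem.List.pyGet? l hi = some c) :
    seg l lo hi = seg l lo (hi - 1) ++ [c] := by
  have hlt : hi.toNat < l.length := by omega
  rw [PySem.List.pyGet?_eq_some_getElem l (by omega) (by omega)] at hc
  have hcv : l[hi.toNat] = c := Option.some.inj hc
  have hm : (hi + 1).toNat - lo.toNat = (hi.toNat - lo.toNat) + 1 := by omega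
  have hm2 : (hi - 1 + 1).toNat - lo.toNat = hi.toNat - lo.toNat := by omega
  rw [seg, hm, List.take_add_one, seg, hm2]
  congr 1
  rw [List.getElem?_drop]
  have hx : lo.toNat + (hi.toNat - lo.toNat) = hi.toNat := by omega
  rw [hx, List.getElem?_eq_getElem hlt, hcv]
  rfl

theorem pyGet_some (l : List Char) (i : Int) (h0 : 0 ≤ i) (hlen : i < l.length) :
    ∃ c, PySem.List.pyGet? l i = some c := by
  rcases h' : PySem.List.pyGet? l i with _ | c
  · rw [PySem.List.pyGet?_eq_none_iff] at h'
    exact absurd ⟨by omega, by omega⟩ h'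
  · exact ⟨c, rfl⟩

theorem skipLoF_ge (l : List Char) (fuel : Nat) :
    ∀ lo hi : Int, lo ≤ skipLoF fuel l lo hi := by
  induction fuel with
  | zero => intro lo hi; simp [skipLoF]
  | succ fuel ih =>
    intro lo hi
    rw [skipLoF]
    split
    · have := ih (lo + 1) hi
      omega
    · omega

theorem skipLoF_stop (l : List Char) (fuel : Nat) (lo hi : Int)
    (h : PySem.List.pyGet? l lo ≠ some 'a') : skipLoF fuel l lo hi = lo := by
  cases fuel with
  | zero => rfl
  | succ fuel => rw [skipLoF, if_neg (by tauto)]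

theorem skipLoF_gt (l : List Char) (fuel : Nat) (lo hi : Int) (hf : 1 ≤ fuel)
    (h1 : lo ≤ hi) (h2 : PySem.List.pyGet? l lo = some 'a') : lo < skipLoF fuel l lo hi := by
  cases fuel with
  | zero => omega
  | succ fuel =>
    rw [skipLoF, if_pos ⟨h1, h2⟩]
    have := skipLoF_ge l fuel (lo + 1) hi
    omega

theorem skipHiF_le (l : List Char) (fuel : Nat) :
    ∀ lo hi : Int, skipHiF fuel l lo hi ≤ hi := by
  induction fuel with
  | zero => intro lo hi; simp [skipHiF]
  | succ fuel ih =>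
    intro lo hi
    rw [skipHiF]
    split
    · have := ih lo (hi - 1)
      omega
    · omega

theorem skipHiF_lt (l : List Char) (fuel : Nat) (lo hi : Int) (hf : 1 ≤ fuel)
    (h1 : lo ≤ hi) (h2 : PySem.List.pyGet? l hi = some 'a') : skipHiF fuel l lo hi < hi := by
  cases fuel with
  | zero => omega
  | succ fuel =>
    rw [skipHiF, if_pos ⟨h1, h2⟩]
    have := skipHiF_le l fuel lo (hi - 1)
    omega

theorem skipLoF_drop (l : List Char) (hi : Int) (hlen : hi < l.length) :
    ∀ (fuel : Nat) (lo : Int), (hi + 1 - lo).toNat ≤ fuel → 0 ≤ lo →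
      (seg l lo hi).dropWhile (· == 'a') = seg l (skipLoF fuel l lo hi) hi := by
  intro fuel
  induction fuel with
  | zero =>
    intro lo hfu h0
    have : hi < lo := by omega
    rw [seg_nil l lo hi this, skipLoF, seg_nil l lo hi this]
    rfl
  | succ fuel ih =>
    intro lo hfu h0
    by_cases hcond : lo ≤ hi ∧ PySem.List.pyGet? l lo = some 'a'
    · obtain ⟨hle, hget⟩ := hcond
      rw [seg_cons l lo hi 'a' h0 hle hlen hget]
      rw [skipLoF, if_pos ⟨hle, hget⟩, List.dropWhile_cons_of_pos (by simp)]
      exact ih (lo + 1) (by omega) (by omega)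
    · rw [skipLoF, if_neg hcond]
      by_cases hle : lo ≤ hi
      · have hne : PySem.List.pyGet? l lo ≠ some 'a' := by tauto
        obtain ⟨c, hc⟩ := pyGet_some l lo h0 (by omega)
        have hcne : (c == 'a') = false := by
          rcases hb : c == 'a'
          · rfl
          · exact absurd (by rw [hc, eq_of_beq hb]) hne
        rw [seg_cons l lo hi c h0 hle hlen hc, List.dropWhile_cons_of_neg (by simp [hcne])]
      · rw [seg_nil l lo hi (by omega)]
        simp

theorem skipHiF_drop (l : List Char) (lo : Int) (h0 : 0 ≤ lo) :
    ∀ (fuel : Nat) (hi : Int), (hi + 1 - lo).toNat ≤ fuel → hi < l.length →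
      (seg l lo hi).reverse.dropWhile (· == 'a') = (seg l lo (skipHiF fuel l lo hi)).reverse := by
  intro fuel
  induction fuel with
  | zero =>
    intro hi hfu hlen
    have : hi < lo := by omega
    rw [seg_nil l lo hi this, skipHiF, seg_nil l lo hi this]
    rfl
  | succ fuel ih =>
    intro hi hfu hlen
    by_cases hcond : lo ≤ hi ∧ PySem.List.pyGet? l hi = some 'a'
    · obtain ⟨hle, hget⟩ := hcond
      rw [seg_snoc l lo hi 'a' h0 hle hlen hget]
      rw [skipHiF, if_pos ⟨hle, hget⟩, List.reverse_append, List.reverse_singleton,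
          List.singleton_append, List.dropWhile_cons_of_pos (by simp)]
      exact ih (hi - 1) (by omega) (by omega)
    · rw [skipHiF, if_neg hcond]
      by_cases hle : lo ≤ hi
      · have hne : PySem.List.pyGet? l hi ≠ some 'a' := by tauto
        obtain ⟨c, hc⟩ := pyGet_some l hi (by omega) hlen
        have hcne : (c == 'a') = false := by
          rcases hb : c == 'a'
          · rfl
          · exact absurd (by rw [hc, eq_of_beq hb]) hne
        rw [seg_snoc l lo hi c h0 hle hlen hc, List.reverse_append, List.reverse_singleton,
            List.singleton_append, List.dropWhile_cons_of_neg (by simp [hcne])]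
      · rw [seg_nil l lo hi (by omega)]
        simp

theorem strip_segF (l : List Char) (fuel : Nat) (lo hi : Int)
    (hfu : (hi + 1 - lo).toNat ≤ fuel) (h0 : 0 ≤ lo) (hlen : hi < l.length) :
    PySem.Chars.stripChars (seg l lo hi) ['a'] =
      seg l (skipLoF fuel l lo hi) (skipHiF fuel l (skipLoF fuel l lo hi) hi) := by
  rw [stripChars_a]
  rw [skipLoF_drop l hi hlen fuel lo hfu h0]
  have hge := skipLoF_ge l fuel lo hi
  rw [skipHiF_drop l (skipLoF fuel l lo hi) (by omega) fuel hi (by omega) hlen]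
  simp

theorem slice_seg (l : List Char) (lo hi : Int)
    (h0 : 0 ≤ lo) (hhi : lo < hi) (hlen : hi < l.length) :
    PySem.List.slice (seg l lo hi) (some 1) (some (-1)) = seg l (lo + 1) (hi - 1) := by
  have hn : (seg l lo hi).length = (hi + 1).toNat - lo.toNat := seg_length l lo hi hlen
  have h2 : 2 ≤ (seg l lo hi).length := by omega
  have hca : PySem.List.clampIdx (seg l lo hi).length 1 = 1 := by
    simp [PySem.List.clampIdx]
    omega
  have hne : seg l lo hi ≠ [] := List.ne_nil_of_length_pos (by omega)
  have hcb : PySem.List.clampIdx (seg l lo hi).length (-1) = (seg l lo hi).length - 1 := by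
    simp [PySem.List.clampIdx, hne]
    omega
  simp only [PySem.List.slice, hca, hcb]
  rw [hn]
  rw [seg, seg, List.drop_take, List.drop_drop, List.take_take]
  congr 1
  · omega
  · congr 1
    omega

theorem seg_pyGet_zero (l : List Char) (lo hi : Int) (c : Char)
    (h0 : 0 ≤ lo) (hhi : lo ≤ hi) (hlen : hi < l.length)
    (hc : PySem.List.pyGet? l lo = some c) :
    PySem.List.pyGet? (seg l lo hi) 0 = some c := by
  rw [seg_cons l lo hi c h0 hhi hlen hc]
  exact PySem.List.pyGet?_zero_cons _ _

theorem seg_pyGet_last (l : List Char) (lo hi : Int) (c : Char)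
    (h0 : 0 ≤ lo) (hhi : lo ≤ hi) (hlen : hi < l.length)
    (hc : PySem.List.pyGet? l hi = some c) :
    PySem.List.pyGet? (seg l lo hi) (-1) = some c := by
  rw [seg_snoc l lo hi c h0 hhi hlen hc]
  exact PySem.List.pyGet?_neg_one_append_singleton _ _

-- the bridge: B's index loop computes exactly "A's loop on the segment ends in 'a'"
theorem loopBF_eq (l : List Char) :
    ∀ (fuel : Nat) (lo hi : Int), (hi + 1 - lo).toNat ≤ fuel → 0 ≤ lo → hi < l.length →
      loopBF fuel l lo hi = (loopA (seg l lo hi) == ['a']) := by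
  intro fuel
  induction fuel with
  | zero =>
    intro lo hi hfu h0 hlen
    rw [loopBF]
    by_cases heq : lo = hi
    · subst heq
      obtain ⟨c, hc⟩ := pyGet_some l lo h0 (by omega)
      rw [seg_cons l lo lo c h0 le_rfl hlen hc, seg_nil l (lo + 1) lo (by omega)]
      rw [loopA, dif_neg (by simp)]
      rw [hc]
      simp
    · have hlt : hi < lo := by omega
      rw [seg_nil l lo hi hlt]
      rw [loopA, dif_neg (by simp)]
      have hf : (lo == hi) = false := by simp [heq]
      rw [hf]
      simp
  | succ fuel ih =>
    intro lo hi hfu h0 hlen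
    by_cases hcond : 1 ≤ hi - lo
    · by_cases ha : PySem.List.pyGet? l lo = some 'a' ∨ PySem.List.pyGet? l hi = some 'a'
      · -- strip branch
        have h2 : 2 ≤ (seg l lo hi).length := by
          rw [seg_length l lo hi hlen]; omega
        have hsega : PySem.List.pyGet? (seg l lo hi) 0 = some 'a' ∨
            PySem.List.pyGet? (seg l lo hi) (-1) = some 'a' := by
          rcases ha with h | h
          · exact Or.inl (seg_pyGet_zero l lo hi 'a' h0 (by omega) hlen h)
          · exact Or.inr (seg_pyGet_last l lo hi 'a' h0 (by omega) hlen h)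
        rw [loopBF, if_pos hcond, if_pos ha]
        rw [loopA, dif_pos h2, dif_pos hsega]
        have hfu2 : (hi + 1 - lo).toNat ≤ fuel + 1 := by omega
        rw [strip_segF l (fuel + 1) lo hi hfu2 h0 hlen]
        set lo' := skipLoF (fuel + 1) l lo hi with hlo'
        set hi' := skipHiF (fuel + 1) l lo' hi with hhi'
        have hge : lo ≤ lo' := skipLoF_ge l (fuel + 1) lo hi
        have hle : hi' ≤ hi := skipHiF_le l (fuel + 1) lo' hi
        have hdec : (hi' + 1 - lo').toNat ≤ fuel := by
          by_cases hl : PySem.List.pyGet? l lo = some 'a'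
          · have h1 := skipLoF_gt l (fuel + 1) lo hi (by omega) (by omega) hl
            omega
          · have hlo := skipLoF_stop l (fuel + 1) lo hi hl
            have hh : PySem.List.pyGet? l hi = some 'a' := by tauto
            have h2' := skipHiF_lt l (fuel + 1) lo' hi (by omega) (by omega) hh
            omega
        exact ih lo' hi' hdec (by omega) (by omega)
      · by_cases hb : PySem.List.pyGet? l lo = some 'b' ∧ PySem.List.pyGet? l hi = some 'b'
        · -- peel branch
          obtain ⟨hbl, hbh⟩ := hb
          have h2 : 2 ≤ (seg l lo hi).length := by
            rw [seg_length l lo hi hlen]; omega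
          have hsega : ¬ (PySem.List.pyGet? (seg l lo hi) 0 = some 'a' ∨
              PySem.List.pyGet? (seg l lo hi) (-1) = some 'a') := by
            rintro (h | h)
            · rw [seg_pyGet_zero l lo hi 'b' h0 (by omega) hlen hbl] at h
              simp at h
            · rw [seg_pyGet_last l lo hi 'b' h0 (by omega) hlen hbh] at h
              simp at h
          have hsegb : PySem.List.pyGet? (seg l lo hi) 0 = some 'b' ∧
              PySem.List.pyGet? (seg l lo hi) (-1) = some 'b' :=
            ⟨seg_pyGet_zero l lo hi 'b' h0 (by omega) hlen hbl,
             seg_pyGet_last l lo hi 'b' h0 (by omega) hlen hbh⟩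
          rw [loopBF, if_pos hcond, if_neg ha, if_pos ⟨hbl, hbh⟩]
          rw [loopA, dif_pos h2, dif_neg hsega, if_pos hsegb]
          rw [slice_seg l lo hi h0 (by omega) hlen]
          exact ih (lo + 1) (hi - 1) (by omega) (by omega) (by omega)
        · -- stuck: B returns False; A's port returns the unchanged length-≥-2 string ≠ "a"
          obtain ⟨ca, hca⟩ := pyGet_some l lo h0 (by omega)
          obtain ⟨cb, hcb⟩ := pyGet_some l hi (by omega) hlen
          have h2 : 2 ≤ (seg l lo hi).length := by
            rw [seg_length l lo hi hlen]; omega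
          have hsega : ¬ (PySem.List.pyGet? (seg l lo hi) 0 = some 'a' ∨
              PySem.List.pyGet? (seg l lo hi) (-1) = some 'a') := by
            rintro (h | h)
            · rw [seg_pyGet_zero l lo hi ca h0 (by omega) hlen hca] at h
              exact ha (Or.inl (by rw [hca, Option.some.inj h]))
            · rw [seg_pyGet_last l lo hi cb h0 (by omega) hlen hcb] at h
              exact ha (Or.inr (by rw [hcb, Option.some.inj h]))
          have hsegb : ¬ (PySem.List.pyGet? (seg l lo hi) 0 = some 'b' ∧
              PySem.List.pyGet? (seg l lo hi) (-1) = some 'b') := by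
            rintro ⟨h1, h2'⟩
            rw [seg_pyGet_zero l lo hi ca h0 (by omega) hlen hca] at h1
            rw [seg_pyGet_last l lo hi cb h0 (by omega) hlen hcb] at h2'
            exact hb ⟨by rw [hca, Option.some.inj h1], by rw [hcb, Option.some.inj h2']⟩
          rw [loopBF, if_pos hcond, if_neg ha, if_neg hb]
          rw [loopA, dif_pos h2, dif_neg hsega, if_neg hsegb]
          rcases hbeq : (seg l lo hi == ['a'] : Bool)
          · rfl
          · have he := eq_of_beq hbeq
            have hl := congrArg List.length he
            simp at hl
            omega
    · -- loop exit
      rw [loopBF, if_neg hcond]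
      by_cases heq : lo = hi
      · subst heq
        obtain ⟨c, hc⟩ := pyGet_some l lo h0 (by omega)
        rw [seg_cons l lo lo c h0 le_rfl hlen hc, seg_nil l (lo + 1) lo (by omega)]
        rw [loopA, dif_neg (by simp)]
        rw [hc]
        simp
      · have hlt : hi < lo := by omega
        rw [seg_nil l lo hi hlt]
        rw [loopA, dif_neg (by simp)]
        have hf : (lo == hi) = false := by simp [heq]
        rw [hf]
        simp

theorem seg_full (l : List Char) : seg l 0 ((l.length : Int) - 1) = l := by
  simp [seg]

-- ===== VERDICT (by name: the statement is the Claim_ definition above) =====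
theorem solution_spec : Claim_equal_solution := by
  intro a _
  unfold Spec_solution solution solution_alt
  apply List.map_congr_left
  intro s _
  rw [loopBF_eq s.toList (s.toList.length + 1) 0 ((s.toList.length : Int) - 1)
    (by omega) le_rfl (by omega)]
  rw [seg_full]
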